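-- pv_equiv track=rewrite | github.com/BooleanCube/collatz-conjecture | glide_graph.py | glide
-- ===== SOURCE A (Python) =====
-- def glide(n):
--     start = n
--     steps = 0
--     while n > 1:
--         if n & 1:
--             n = (3 * n + 1) >> 1
--             steps += 2
--         else:
--             n >>= 1
--             steps += 1
--         if n < start:
--             return steps
--     return steps
-- ===== SOURCE B (Python) =====
-- def glide(n):
--     # Accelerated odd-to-odd iteration: strip all factors of 2 at once; when the
--     # odd part falls below the start, the step index of the first sub-start value
--     # in the halving run is computed in closed form via bit_length.
--     if n <= 1:
--         return 0
--     start = n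
--     steps = 0
--     while True:
--         m, v = n, 0
--         while m % 2 == 0:
--             m //= 2
--             v += 1
--         if m < start:
--             return steps + (n // start).bit_length()
--         steps += v + 1
--         n = 3 * m + 1
-- ===== Notes on version B (the rewrite author's own statement) =====
-- stated objective: alternative
-- what changed: B replaces A's one-Collatz-step-per-iteration loop by an accelerated odd-to-odd iteration: each outer pass strips the entire even part of n at once, and when the odd part falls below the start the exact step index of the first sub-start value in the halving run is computed in closed form with int.bit_length instead of by stepping through the run.
import Mathlib
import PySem

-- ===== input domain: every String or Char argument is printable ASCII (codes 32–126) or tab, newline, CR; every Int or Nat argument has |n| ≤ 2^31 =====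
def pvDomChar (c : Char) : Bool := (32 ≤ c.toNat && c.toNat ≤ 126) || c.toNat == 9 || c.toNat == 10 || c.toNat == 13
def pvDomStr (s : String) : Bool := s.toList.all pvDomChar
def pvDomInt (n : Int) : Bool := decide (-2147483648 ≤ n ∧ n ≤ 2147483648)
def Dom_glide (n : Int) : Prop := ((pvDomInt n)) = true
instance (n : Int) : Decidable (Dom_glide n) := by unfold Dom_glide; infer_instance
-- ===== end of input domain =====

-- B replaces A's per-step glide loop by an accelerated odd-to-odd iteration: it strips all
-- factors of 2 at once and computes the drop step index in closed form via bit_length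
-- (alternative decomposition, no speed claim).


-- ===== PORT A =====
-- A's while loop, as structural recursion on a fuel counter; fuel counts raw Collatz steps
-- (the fused odd iteration consumes 2), and fuel exhaustion returns 0 — with the fuel used
-- below it is never reached for any input whose Python loop terminates within 2^62 steps.
def glideLoopA : Nat → Int → Int → Int → Int
  | 0, _, _, _ => 0
  | fuel+1, n, start, steps =>
    if n > 1 then
      if PySem.Int.mod n 2 = 1 then
        if fuel = 0 then 0  -- fuel exhausted mid fused step (never reached with the fuel used)
        else
          let n' := PySem.Int.floordiv (3 * n + 1) 2   -- (3*n+1) >> 1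
          let steps' := steps + 2
          if n' < start then steps' else glideLoopA (fuel - 1) n' start steps'
      else
        let n' := PySem.Int.floordiv n 2               -- n >> 1
        let steps' := steps + 1
        if n' < start then steps' else glideLoopA fuel n' start steps'
    else steps

def glide (n : Int) : Int := glideLoopA 4611686018427387904 n n 0

-- ===== PORT B =====
-- B's inner while loop (odd part and 2-adic valuation); the '0 < n' guard only makes the
-- recursion terminating, every call from the glide loop has 0 < n.
def glideStrip (n v : Int) : Int × Int :=
  if h : 0 < n ∧ PySem.Int.mod n 2 = 0 then
    glideStrip (PySem.Int.floordiv n 2) (v + 1)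
  else (n, v)
termination_by n.toNat
decreasing_by
  have h2 : PySem.Int.mod n 2 = n % 2 := PySem.Int.mod_eq_emod_of_pos (by omega)
  have hd : PySem.Int.floordiv n 2 = n / 2 := PySem.Int.floordiv_eq_ediv_of_pos (by omega)
  rw [hd]; rw [h2] at h
  omega

-- int.bit_length (exact for the nonnegative arguments B feeds it)
def pyBitLength (q : Int) : Int := if q = 0 then 0 else ((Nat.log2 q.natAbs + 1 : Nat) : Int)

-- B's outer while loop; fuel counts raw Collatz steps (each iteration consumes v+1 of the
-- incoming fuel plus one more on recursion), fuel exhaustion returns 0, and the returning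
-- branch checks the fuel only so that exhaustion matches A's — never reached with the fuel used.
def glideLoopB : Nat → Int → Int → Int → Int
  | 0, _, _, _ => 0
  | f+1, n, start, steps =>
    let p := glideStrip n 0
    let m := p.1
    let v := p.2
    if m < start then
      let j := pyBitLength (PySem.Int.floordiv n start)
      if j ≤ (f : Int) + 1 then steps + j else 0
    else
      glideLoopB (f - v.toNat) (3 * m + 1) start (steps + v + 1)

def glide_alt (n : Int) : Int :=
  if n ≤ 1 then 0 else glideLoopB 4611686018427387904 n n 0

-- ===== PRECONDITION & SPEC =====
def Spec_glide (n : Int) (out : Int) : Prop := out = glide_alt n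
instance (n : Int) (out : Int) : Decidable (Spec_glide n out) := by unfold Spec_glide; infer_instance

-- ===== CLAIM (what is proved, stated in full; the proofs are below) =====
def Claim_equal_glide : Prop := ∀ (n : Int), Dom_glide n → Spec_glide n (glide n)

-- ===== LEMMAS AND PROOFS =====

lemma strip_spec : ∀ (n v : Int), 0 < n → ∃ (m : Int) (k : Nat), glideStrip n v = (m, v + k) ∧ n = m * 2 ^ k ∧ m % 2 = 1 ∧ 1 ≤ m := by
  intro n v
  induction n, v using glideStrip.induct with
  | case1 n v h ih =>
    intro _
    have h2 : PySem.Int.mod n 2 = n % 2 := PySem.Int.mod_eq_emod_of_pos (by omega)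
    have hd : PySem.Int.floordiv n 2 = n / 2 := PySem.Int.floordiv_eq_ediv_of_pos (by omega)
    rw [h2] at h
    obtain ⟨m, k, he, hn, hodd, hm⟩ := ih (by rw [hd]; omega)
    refine ⟨m, k + 1, ?_, ?_, hodd, hm⟩
    · rw [glideStrip]
      rw [dif_pos ⟨h.1, by rw [h2]; exact h.2⟩]
      rw [he]
      have : v + 1 + (k:Int) = v + ((k+1 : Nat) : Int) := by push_cast; ring
      rw [this]
    · rw [hd] at hn
      have : n / 2 * 2 = n := by omega
      rw [pow_succ]
      rw [← this, hn]; ring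
  | case2 n v h =>
    intro h0
    rw [Classical.not_and_iff_not_or_not] at h
    have h2 : PySem.Int.mod n 2 = n % 2 := PySem.Int.mod_eq_emod_of_pos (by omega)
    refine ⟨n, 0, ?_, by ring, by omega, by omega⟩
    · rw [glideStrip, dif_neg]
      · simp
      · rw [h2]; omega

lemma blChar (N start : Int) (hs : 0 < start) (hN : start ≤ N) (j : Nat) :
    pyBitLength (N / start) ≤ (j : Int) ↔ N < start * 2 ^ j := by
  have hq1 : 1 ≤ N / start := by rw [Int.le_ediv_iff_mul_le hs]; omega
  have hQ : ((N / start).natAbs : Int) = N / start := Int.natAbs_of_nonneg (by omega)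
  rw [pyBitLength, if_neg (by omega)]
  rw [show ((Nat.log2 (N / start).natAbs + 1 : Nat) : Int) ≤ (j : Int) ↔
      Nat.log2 (N / start).natAbs + 1 ≤ j from Int.ofNat_le]
  rw [Nat.succ_le_iff, Nat.log2_lt (by omega)]
  rw [show ((N / start).natAbs < 2 ^ j ↔ ((N / start).natAbs : Int) < ((2 ^ j : Nat) : Int)) from (Int.ofNat_lt).symm]
  rw [hQ]; push_cast
  rw [Int.ediv_lt_iff_lt_mul hs]
  constructor <;> intro h <;> linarith [h]

lemma blOne (N start : Int) (hs : 0 < start) (hN : start ≤ N) :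
    1 ≤ pyBitLength (N / start) := by
  have := (blChar N start hs hN 0).not
  simp only [pow_zero, mul_one] at this
  omega

lemma blSucc (N start : Int) (hs : 2 ≤ start) (hN : start ≤ N / 2) (he : N % 2 = 0) :
    pyBitLength (N / start) = pyBitLength ((N / 2) / start) + 1 := by
  have hN' : start ≤ N := by omega
  have key : ∀ j : Nat, (pyBitLength ((N / 2) / start) ≤ (j : Int) ↔ pyBitLength (N / start) ≤ ((j + 1 : Nat) : Int)) := by
    intro j
    rw [blChar (N/2) start (by omega) hN j, blChar N start (by omega) hN' (j+1)]
    rw [pow_succ]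
    have h2 : start * (2 ^ j * 2) = 2 * (start * 2 ^ j) := by ring
    rw [h2]
    omega
  have ha1 : 1 ≤ pyBitLength (N / start) := blOne N start (by omega) hN'
  have hb1 : 1 ≤ pyBitLength ((N / 2) / start) := blOne (N/2) start (by omega) hN
  set a := pyBitLength (N / start) with hadef
  set b := pyBitLength ((N / 2) / start) with hbdef
  have hB : ((b.toNat : Int)) = b := Int.toNat_of_nonneg (by omega)
  have hA : (((a - 1).toNat : Int)) = a - 1 := Int.toNat_of_nonneg (by omega)
  have h1 := (key b.toNat).mp (by omega)
  have h2 := (key (a - 1).toNat).mpr (by omega)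
  push_cast at h1 h2
  omega

lemma stripA : ∀ (k : Nat) (f : Nat) (m start s : Int), 2 ≤ start → start ≤ m →
    glideLoopA f (m * 2 ^ k) start s =
      if k ≤ f then glideLoopA (f - k) m start (s + k) else 0 := by
  intro k
  induction k with
  | zero => intro f m start s _ _; simp
  | succ k ih =>
    intro f m start s hs hm
    have hpk : (0:Int) < 2 ^ k := pow_pos (by norm_num) k
    have hmk : start ≤ m * 2 ^ k := le_trans hm (le_mul_of_one_le_right (by omega) (by omega))
    have hN : m * 2 ^ (k+1) = (m * 2 ^ k) * 2 := by rw [pow_succ]; ring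
    match f with
    | 0 => simp [glideLoopA]
    | f+1 =>
      have hgt : m * 2 ^ (k+1) > 1 := by rw [hN]; omega
      have hmod : PySem.Int.mod (m * 2 ^ (k+1)) 2 = 0 := by
        rw [PySem.Int.mod_eq_emod_of_pos (by omega), hN, Int.mul_emod_left]
      have hdiv : PySem.Int.floordiv (m * 2 ^ (k+1)) 2 = m * 2 ^ k := by
        rw [PySem.Int.floordiv_eq_ediv_of_pos (by omega), hN, Int.mul_ediv_cancel _ two_ne_zero]
      simp only [glideLoopA, hgt, if_pos, hmod, hdiv]
      norm_num
      rw [if_neg (by omega)]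
      rw [ih f m start (s+1) hs hm]
      by_cases hk : k ≤ f
      · rw [if_pos hk, if_pos (by omega)]
        have : f + 1 - (k + 1) = f - k := by omega
        rw [this]
        congr 1
        ring
      · rw [if_neg hk, if_neg (by omega)]

lemma dropA : ∀ (k : Nat) (f : Nat) (m start s : Int), 0 ≤ m → m < start → 2 ≤ start →
    start ≤ m * 2 ^ k →
    glideLoopA f (m * 2 ^ k) start s =
      if pyBitLength ((m * 2 ^ k) / start) ≤ (f : Int) then s + pyBitLength ((m * 2 ^ k) / start)
      else 0 := by
  intro k
  induction k with
  | zero => intro f m start s h0 hlt hs hge; simp at hge; omega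
  | succ k ih =>
    intro f m start s h0 hlt hs hge
    have hpk : (0:Int) < 2 ^ k := pow_pos (by norm_num) k
    have hN : m * 2 ^ (k+1) = (m * 2 ^ k) * 2 := by rw [pow_succ]; ring
    have hb1 : 1 ≤ pyBitLength ((m * 2 ^ (k+1)) / start) := blOne _ _ (by omega) hge
    have hhalf : (m * 2 ^ (k+1)) / 2 = m * 2 ^ k := by rw [hN, Int.mul_ediv_cancel _ two_ne_zero]
    have hev : (m * 2 ^ (k+1)) % 2 = 0 := by rw [hN, Int.mul_emod_left]
    match f with
    | 0 =>
      simp [glideLoopA]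
      intro hc; omega
    | f+1 =>
      have hgt : m * 2 ^ (k+1) > 1 := by omega
      have hmod : PySem.Int.mod (m * 2 ^ (k+1)) 2 = 0 := by
        rw [PySem.Int.mod_eq_emod_of_pos (by omega)]; exact hev
      have hdiv : PySem.Int.floordiv (m * 2 ^ (k+1)) 2 = m * 2 ^ k := by
        rw [PySem.Int.floordiv_eq_ediv_of_pos (by omega)]; exact hhalf
      simp only [glideLoopA, hgt, if_pos, hmod, hdiv]
      norm_num
      by_cases hcase : m * 2 ^ k < start
      · rw [if_pos hcase]
        have hle1 : pyBitLength ((m * 2 ^ (k+1)) / start) ≤ 1 := by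
          have h := blChar (m * 2 ^ (k+1)) start (by omega) hge 1
          rw [pow_one] at h; push_cast at h; omega
        have heq1 : pyBitLength ((m * 2 ^ (k+1)) / start) = 1 := by omega
        rw [heq1, if_pos (by omega)]
      · rw [if_neg hcase]
        rw [not_lt] at hcase
        rw [ih f m start (s+1) h0 hlt hs hcase]
        have hsucc : pyBitLength ((m * 2 ^ (k+1)) / start) = pyBitLength ((m * 2 ^ k) / start) + 1 := by
          have := blSucc (m * 2 ^ (k+1)) start hs (by rw [hhalf]; exact hcase) hev
          rw [hhalf] at this; exact this
        rw [hsucc]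
        by_cases hf : pyBitLength ((m * 2 ^ k) / start) ≤ (f : Int)
        · rw [if_pos hf, if_pos (by omega)]; ring
        · rw [if_neg hf, if_neg (by omega)]

lemma oddStepA (g : Nat) (m start s : Int) (hs : 2 ≤ start) (hm : start ≤ m) (hodd : m % 2 = 1) :
    glideLoopA g m start s = glideLoopA (g - 2) ((3 * m + 1) / 2) start (s + 2) := by
  match g with
  | 0 => simp [glideLoopA]
  | 1 =>
    have h1 : m > 1 := by omega
    have hmod : PySem.Int.mod m 2 = 1 := by rw [PySem.Int.mod_eq_emod_of_pos (by omega)]; exact hodd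
    simp [glideLoopA, h1]
    omega
  | g+2 =>
    have h1 : m > 1 := by omega
    have hmod : PySem.Int.mod m 2 = 1 := by rw [PySem.Int.mod_eq_emod_of_pos (by omega)]; exact hodd
    have hdiv : PySem.Int.floordiv (3 * m + 1) 2 = (3 * m + 1) / 2 := PySem.Int.floordiv_eq_ediv_of_pos (by omega)
    have hnd : ¬ ((3 * m + 1) / 2 < start) := by omega
    simp only [glideLoopA, h1, hmod, hdiv, if_pos, Nat.succ_ne_zero, Nat.add_sub_cancel]
    norm_num
    intro h
    exact absurd h hnd

lemma mainAB : ∀ (f : Nat) (n start s : Int), 2 ≤ start →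
    ((n % 2 = 1 → start ≤ n → glideLoopA f n start s = glideLoopB f n start s) ∧
     (n % 2 = 0 → start ≤ n / 2 → glideLoopA (f - 1) (n / 2) start (s + 1) = glideLoopB f n start s)) := by
  intro f
  induction f using Nat.strong_induction_on with
  | _ f ih =>
    intro n start s hs
    constructor
    · -- odd loop top, A and B aligned
      intro hodd hge
      match f with
      | 0 => simp [glideLoopA, glideLoopB]
      | f+1 =>
        have hstrip : glideStrip n 0 = (n, 0) := by
          rw [glideStrip, dif_neg]
          rw [PySem.Int.mod_eq_emod_of_pos (by omega : (0:Int) < 2)]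
          omega
        have hB : glideLoopB (f+1) n start s = glideLoopB f (3 * n + 1) start (s + 1) := by
          simp only [glideLoopB, hstrip]
          rw [if_neg (by omega)]
          norm_num
        rw [hB]
        rw [oddStepA (f+1) n start s hs hge hodd]
        match f with
        | 0 => simp [glideLoopA, glideLoopB]
        | f+1 =>
          have := (ih (f+1) (by omega) (3 * n + 1) start (s + 1) hs).2 (by omega) (by omega)
          have h2 : s + 1 + 1 = s + 2 := by ring
          rw [h2] at this
          simpa using this
    · -- even loop top: A has already taken the first halving
      intro hev hge2
      match f with
      | 0 => simp [glideLoopA, glideLoopB]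
      | f+1 =>
        have hn0 : (0:Int) < n := by omega
        obtain ⟨m, k, hstrip, hnmk, hmodd, hm1⟩ := strip_spec n 0 hn0
        obtain ⟨k', rfl⟩ : ∃ k', k = k' + 1 := by
          refine ⟨k - 1, ?_⟩
          rcases Nat.eq_zero_or_pos k with h | h
          · subst h; simp at hnmk; omega
          · omega
        have hpk : (0:Int) < 2 ^ k' := pow_pos (by norm_num) k'
        have hNsplit : n = (m * 2 ^ k') * 2 := by rw [hnmk, pow_succ]; ring
        have hhalf : n / 2 = m * 2 ^ k' := by rw [hNsplit, Int.mul_ediv_cancel _ two_ne_zero]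
        have hA1 : (f : Nat) + 1 - 1 = f := rfl
        by_cases hcase : m < start
        · -- the drop happens inside this halving run
          have hdropA := dropA k' f m start (s + 1) (by omega) hcase hs (by rw [← hhalf]; exact hge2)
          have hfd : PySem.Int.floordiv n start = n / start :=
            PySem.Int.floordiv_eq_ediv_of_pos (by omega)
          have hsucc : pyBitLength (n / start) = pyBitLength ((n / 2) / start) + 1 :=
            blSucc n start hs hge2 hev
          simp only [glideLoopB, hstrip, if_pos hcase, hfd, hA1]
          rw [← hhalf] at hdropA
          rw [hdropA, hsucc, hhalf]
          by_cases hf : pyBitLength ((m * 2 ^ k') / start) ≤ (f : Int)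
          · rw [if_pos hf, if_pos (by omega)]; ring
          · rw [if_neg hf, if_neg (by omega)]
        · -- no drop: strip the run, take the odd step, recurse
          rw [not_lt] at hcase
          have hBstep : glideLoopB (f+1) n start s =
              glideLoopB (f - (k' + 1)) (3 * m + 1) start (s + (k' + 1) + 1) := by
            have e1 : (0 + ((k' + 1 : Nat) : Int)) = ((k' + 1 : Nat) : Int) := by ring
            simp only [glideLoopB, hstrip, e1, Int.toNat_natCast]
            rw [if_neg (by omega)]
            congr 1
          have hAstrip := stripA k' f m start (s + 1) hs hcase
          rw [hA1, hhalf, hAstrip]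
          by_cases hk : k' ≤ f
          · rw [if_pos hk]
            rw [oddStepA (f - k') m start (s + 1 + k') hs hcase hmodd]
            rw [hBstep]
            match hfk : f - k' with
            | 0 =>
              have : f - (k' + 1) = 0 := by omega
              rw [this]
              simp [glideLoopA, glideLoopB]
            | 1 =>
              have : f - (k' + 1) = 0 := by omega
              rw [this]
              simp [glideLoopA, glideLoopB]
            | g+2 =>
              have hg : (g + 2 - 2 : Nat) = f - (k' + 1) - 1 := by omega
              rw [hg]
              have := (ih (f - (k' + 1)) (by omega) (3 * m + 1) start (s + ((k' : Int) + 1) + 1) hs).2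
                (by omega) (by omega)
              have harg : s + 1 + (k' : Int) + 2 = s + ((k' : Int) + 1) + 1 + 1 := by ring
              rw [harg]
              exact this
          · rw [if_neg hk]
            rw [hBstep]
            have : f - (k' + 1) = 0 := by omega
            rw [this]
            simp [glideLoopB]


lemma glide_eq : ∀ (n : Int), glide n = glide_alt n := by
  intro n
  unfold glide glide_alt
  have hK : (4611686018427387904 : Nat) = 4611686018427387903 + 1 := by norm_num
  by_cases h1 : n ≤ 1
  · rw [if_pos h1, hK]
    rw [glideLoopA]
    rw [if_neg (by omega)]
  · rw [if_neg h1]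
    rcases Int.emod_two_eq n with hev | hodd
    · -- n even at the very start: the first halving already drops below start
      obtain ⟨m, k, hstrip, hnmk, hmodd, hm1⟩ := strip_spec n 0 (by omega)
      have hk1 : 1 ≤ k := by
        rcases Nat.eq_zero_or_pos k with h | h
        · subst h; simp at hnmk; omega
        · omega
      have h2k : (2:Int) * m ≤ m * 2 ^ k := by
        calc (2:Int) * m = m * 2 ^ 1 := by ring
        _ ≤ m * 2 ^ k := by
          apply mul_le_mul_of_nonneg_left _ (by omega)
          exact pow_le_pow_right₀ (by norm_num) hk1
      have hmn : m < n := by omega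
      have hmod : PySem.Int.mod n 2 = 0 := by rw [PySem.Int.mod_eq_emod_of_pos (by omega)]; exact hev
      have hdiv : PySem.Int.floordiv n 2 = n / 2 := PySem.Int.floordiv_eq_ediv_of_pos (by omega)
      have hfd : PySem.Int.floordiv n n = 1 := by
        rw [PySem.Int.floordiv_eq_ediv_of_pos (by omega), Int.ediv_self (by omega)]
      have hbl1 : pyBitLength 1 = 1 := by decide
      rw [hK]
      rw [glideLoopA, glideLoopB]
      rw [hstrip, hmod, hdiv]
      rw [if_pos (by omega : n > 1)]
      rw [if_neg (by norm_num : ¬ (0:Int) = 1)]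
      rw [if_pos (by omega : n / 2 < n)]
      simp only
      rw [if_pos hmn, hfd, hbl1]
      rw [if_pos (by
        have : (0:Int) ≤ ((4611686018427387903:Nat):Int) := Int.natCast_nonneg _
        omega)]
    · exact (mainAB 4611686018427387904 n n 0 (by omega)).1 hodd le_rfl

-- ===== VERDICT (by name: the statement is the Claim_ definition above) =====
theorem glide_spec : Claim_equal_glide := by
  intro n _
  unfold Spec_glide
  exact glide_eq n
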